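-- pv_equiv track=rewrite | github.com/Dungmeww/CoCaro | app.py | is_open_four
-- ===== SOURCE A (Python) =====
-- def is_in(board, y, x):
--     return 0 <= y < len(board) and 0 <= x < len(board)
--
-- def is_open_four(board, player):
--     n = len(board)
--     dirs = [(0,1),(1,0),(1,1),(1,-1)]
--     for y in range(n):
--         for x in range(n):
--             for dy,dx in dirs:
--                 seg = []
--                 for k in range(6):
--                     ny = y + k*dy
--                     nx = x + k*dx
--                     if not is_in(board, ny, nx):
--                         seg = None; break
--                     seg.append(board[ny][nx])
--                 if seg and seg == [0, player, player, player, player, 0]: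
--                     return True
--     return False
-- ===== SOURCE B (Python) =====
-- def is_open_four(board, player):
--     n = len(board)
--     grid = [row[:n] for row in board[:n]]
--     lines = []
--     for row in grid:
--         lines.append(row)
--     for x in range(n):
--         lines.append([grid[k][x] for k in range(n)])
--     for x in range(n):
--         lines.append([grid[k][x + k] for k in range(n - x)])
--     for y in range(1, n):
--         lines.append([grid[y + k][k] for k in range(n - y)])
--     for x in range(n):
--         lines.append([grid[k][x - k] for k in range(x + 1)])
--     for y in range(1, n):
--         lines.append([grid[y + k][n - 1 - k] for k in range(n - y)])
--     win = [0, player, player, player, player, 0]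
--     return any(line[i:i + 6] == win for line in lines
--                for i in range(len(line) - 5))
-- ===== Notes on version B (the rewrite author's own statement) =====
-- stated objective: faster
-- what changed: B extracts every line of the board once (rows, columns, both diagonal families of the n-by-n grid) and slides a length-6 window over each line, instead of A's rebuilding a fresh 6-cell segment per cell per direction with per-cell bounds checks.
import Mathlib
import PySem

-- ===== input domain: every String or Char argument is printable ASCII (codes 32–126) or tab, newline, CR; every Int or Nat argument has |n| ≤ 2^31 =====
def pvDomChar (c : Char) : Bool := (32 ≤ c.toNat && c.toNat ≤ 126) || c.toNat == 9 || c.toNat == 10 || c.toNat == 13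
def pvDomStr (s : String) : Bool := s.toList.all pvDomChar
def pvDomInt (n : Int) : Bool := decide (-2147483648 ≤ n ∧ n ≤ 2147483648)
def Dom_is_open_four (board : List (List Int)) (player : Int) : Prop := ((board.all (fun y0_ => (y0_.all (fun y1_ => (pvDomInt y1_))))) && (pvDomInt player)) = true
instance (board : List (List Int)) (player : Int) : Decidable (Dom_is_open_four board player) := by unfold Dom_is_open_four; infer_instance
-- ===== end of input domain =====

-- B replaces A's per-cell, per-direction 6-segment rebuilding by extracting every row, column and
-- both diagonal families once and sliding a 6-window over each line (objective: faster, constant-factor).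

-- ===== PORT A =====
-- board[ny][nx]: total stand-in via pyGetD; exact whenever both indices are in range,
-- which pvIsIn guarantees for the row index and Pre_ for the column index.
def pvCell (g : List (List Int)) (y x : Int) : Int :=
  PySem.List.pyGetD (PySem.List.pyGetD g y []) x 0

def pvIsIn (board : List (List Int)) (y x : Int) : Bool :=
  decide (0 ≤ y) && decide (y < PySem.List.len board) &&
  decide (0 ≤ x) && decide (x < PySem.List.len board)

def pvSeg (board : List (List Int)) (y x dy dx : Int) : Option (List Int) :=
  (List.range 6).foldl
    (fun seg k =>
      match seg with
      | none => none
      | some s =>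
        let ny := y + (k : Int) * dy
        let nx := x + (k : Int) * dx
        if pvIsIn board ny nx then some (s ++ [pvCell board ny nx]) else none)
    (some [])

def is_open_four (board : List (List Int)) (player : Int) : Bool :=
  let n := board.length
  let dirs : List (Int × Int) := [(0,1),(1,0),(1,1),(1,-1)]
  (List.range n).any fun y =>
    (List.range n).any fun x =>
      dirs.any fun d =>
        match pvSeg board (y : Int) (x : Int) d.1 d.2 with
        | none => false
        | some seg => !seg.isEmpty && seg == [0, player, player, player, player, 0]

-- ===== PORT B =====
def is_open_four_alt (board : List (List Int)) (player : Int) : Bool :=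
  let n : Int := PySem.List.len board
  let grid := (PySem.List.slice board none (some n)).map
    (fun row => PySem.List.slice row none (some n))
  let lines :=
    grid
    ++ (PySem.List.pyRange 0 n 1).map (fun x =>
         (PySem.List.pyRange 0 n 1).map (fun k => pvCell grid k x))
    ++ (PySem.List.pyRange 0 n 1).map (fun x =>
         (PySem.List.pyRange 0 (n - x) 1).map (fun k => pvCell grid k (x + k)))
    ++ (PySem.List.pyRange 1 n 1).map (fun y =>
         (PySem.List.pyRange 0 (n - y) 1).map (fun k => pvCell grid (y + k) k))
    ++ (PySem.List.pyRange 0 n 1).map (fun x =>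
         (PySem.List.pyRange 0 (x + 1) 1).map (fun k => pvCell grid k (x - k)))
    ++ (PySem.List.pyRange 1 n 1).map (fun y =>
         (PySem.List.pyRange 0 (n - y) 1).map (fun k => pvCell grid (y + k) (n - 1 - k)))
  let win := [0, player, player, player, player, 0]
  lines.any fun line =>
    (PySem.List.pyRange 0 (PySem.List.len line - 5) 1).any fun i =>
      PySem.List.slice line (some i) (some (i + 6)) == win

-- ===== PRECONDITION & SPEC =====
-- Pre_ excludes ragged boards (some row shorter than len(board)): there A raises IndexError
-- unless its cell-by-cell scan happens to find the pattern before first touching a missing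
-- cell — an accident of scan order that no caller relies on (the game board is square).
def Pre_is_open_four (board : List (List Int)) (player : Int) : Prop :=
  ∀ row ∈ board, board.length ≤ row.length
instance (board : List (List Int)) (player : Int) : Decidable (Pre_is_open_four board player) := by
  unfold Pre_is_open_four; infer_instance

def pvWitness_is_open_four : List (List Int) × Int := ([[0]], 1)

def Spec_is_open_four (board : List (List Int)) (player : Int) (out : Bool) : Prop := out = is_open_four_alt board player
instance (board : List (List Int)) (player : Int) (out : Bool) : Decidable (Spec_is_open_four board player out) := by unfold Spec_is_open_four; infer_instance

-- ===== CLAIM (what is proved, stated in full; the proofs are below) =====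
def Claim_equal_is_open_four : Prop := ∀ (board : List (List Int)) (player : Int), Dom_is_open_four board player → Pre_is_open_four board player → Spec_is_open_four board player (is_open_four board player)

-- ===== LEMMAS AND PROOFS =====

-- value of the board at (y, x), Nat indices
def pvV (board : List (List Int)) (y x : Nat) : Int := (board.getD y []).getD x 0

-- the open-four window
def pvW (p a b c d e f : Int) : Prop := a = 0 ∧ b = p ∧ c = p ∧ d = p ∧ e = p ∧ f = 0

-- canonical description of "some fully-in-bounds 6-window in one of the four directions matches"
def pvHit (B : List (List Int)) (p : Int) : Prop :=
  (∃ y x : Nat, y < B.length ∧ x + 6 ≤ B.length ∧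
     pvW p (pvV B y x) (pvV B y (x+1)) (pvV B y (x+2)) (pvV B y (x+3)) (pvV B y (x+4)) (pvV B y (x+5))) ∨
  (∃ y x : Nat, y + 6 ≤ B.length ∧ x < B.length ∧
     pvW p (pvV B y x) (pvV B (y+1) x) (pvV B (y+2) x) (pvV B (y+3) x) (pvV B (y+4) x) (pvV B (y+5) x)) ∨
  (∃ y x : Nat, y + 6 ≤ B.length ∧ x + 6 ≤ B.length ∧
     pvW p (pvV B y x) (pvV B (y+1) (x+1)) (pvV B (y+2) (x+2)) (pvV B (y+3) (x+3)) (pvV B (y+4) (x+4)) (pvV B (y+5) (x+5))) ∨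
  (∃ y x : Nat, y + 6 ≤ B.length ∧ 5 ≤ x ∧ x < B.length ∧
     pvW p (pvV B y x) (pvV B (y+1) (x-1)) (pvV B (y+2) (x-2)) (pvV B (y+3) (x-3)) (pvV B (y+4) (x-4)) (pvV B (y+5) (x-5)))

lemma pvCell_natCast (B : List (List Int)) (y x : Nat) : pvCell B (y : Int) (x : Int) = pvV B y x := by
  simp [pvCell, pvV, PySem.List.pyGetD_natCast]

lemma pvSeg_hit (B : List (List Int)) (p y x dy dx : Int) :
  ((match pvSeg B y x dy dx with
    | none => false
    | some seg => !seg.isEmpty && seg == [0,p,p,p,p,0]) = true) ↔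
  ((pvIsIn B y x ∧ pvIsIn B (y+dy) (x+dx) ∧ pvIsIn B (y+2*dy) (x+2*dx) ∧
    pvIsIn B (y+3*dy) (x+3*dx) ∧ pvIsIn B (y+4*dy) (x+4*dx) ∧ pvIsIn B (y+5*dy) (x+5*dx)) ∧
   (pvCell B y x = 0 ∧ pvCell B (y+dy) (x+dx) = p ∧ pvCell B (y+2*dy) (x+2*dx) = p ∧
    pvCell B (y+3*dy) (x+3*dx) = p ∧ pvCell B (y+4*dy) (x+4*dx) = p ∧ pvCell B (y+5*dy) (x+5*dx) = 0)) := by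
  have h6 : List.range 6 = [0,1,2,3,4,5] := by decide
  unfold pvSeg
  rw [h6]
  norm_num
  split_ifs <;> simp_all

lemma pvIsIn_iff (B : List (List Int)) (a b : Int) :
    pvIsIn B a b = true ↔ (0 ≤ a ∧ a < B.length ∧ 0 ≤ b ∧ b < B.length) := by
  simp [pvIsIn, PySem.List.len_eq, and_assoc]

set_option maxHeartbeats 1600000 in
lemma hitH (B : List (List Int)) (p : Int) (y x : Nat) :
  ((match pvSeg B (y : Int) (x : Int) 0 1 with
    | none => false
    | some seg => !seg.isEmpty && seg == [0,p,p,p,p,0]) = true) ↔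
  (y < B.length ∧ x + 6 ≤ B.length ∧
    pvW p (pvV B y x) (pvV B y (x+1)) (pvV B y (x+2)) (pvV B y (x+3)) (pvV B y (x+4)) (pvV B y (x+5))) := by
  rw [pvSeg_hit]
  simp only [pvIsIn_iff, pvW]
  norm_num
  constructor
  · rintro ⟨⟨h0, h1, h2, h3, h4, h5⟩, c0, c1, c2, c3, c4, c5⟩
    refine ⟨by omega, by omega, ?_, ?_, ?_, ?_, ?_, ?_⟩ <;>
      (rw [← pvCell_natCast]; push_cast; assumption)
  · rintro ⟨hy, hx, c0, c1, c2, c3, c4, c5⟩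
    refine ⟨⟨?_, ?_, ?_, ?_, ?_, ?_⟩, ?_, ?_, ?_, ?_, ?_, ?_⟩
    all_goals first
    | omega
    | (rw [← pvCell_natCast] at *; push_cast at *; assumption)

set_option maxHeartbeats 1600000 in
lemma hitV (B : List (List Int)) (p : Int) (y x : Nat) :
  ((match pvSeg B (y : Int) (x : Int) 1 0 with
    | none => false
    | some seg => !seg.isEmpty && seg == [0,p,p,p,p,0]) = true) ↔
  (y + 6 ≤ B.length ∧ x < B.length ∧
    pvW p (pvV B y x) (pvV B (y+1) x) (pvV B (y+2) x) (pvV B (y+3) x) (pvV B (y+4) x) (pvV B (y+5) x)) := by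
  rw [pvSeg_hit]
  simp only [pvIsIn_iff, pvW]
  norm_num
  constructor
  · rintro ⟨⟨h0, h1, h2, h3, h4, h5⟩, c0, c1, c2, c3, c4, c5⟩
    refine ⟨by omega, by omega, ?_, ?_, ?_, ?_, ?_, ?_⟩ <;>
      (rw [← pvCell_natCast]; push_cast; assumption)
  · rintro ⟨hy, hx, c0, c1, c2, c3, c4, c5⟩
    refine ⟨⟨?_, ?_, ?_, ?_, ?_, ?_⟩, ?_, ?_, ?_, ?_, ?_, ?_⟩
    all_goals first
    | omega
    | (rw [← pvCell_natCast] at *; push_cast at *; assumption)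

set_option maxHeartbeats 1600000 in
lemma hitD (B : List (List Int)) (p : Int) (y x : Nat) :
  ((match pvSeg B (y : Int) (x : Int) 1 1 with
    | none => false
    | some seg => !seg.isEmpty && seg == [0,p,p,p,p,0]) = true) ↔
  (y + 6 ≤ B.length ∧ x + 6 ≤ B.length ∧
    pvW p (pvV B y x) (pvV B (y+1) (x+1)) (pvV B (y+2) (x+2)) (pvV B (y+3) (x+3)) (pvV B (y+4) (x+4)) (pvV B (y+5) (x+5))) := by
  rw [pvSeg_hit]
  simp only [pvIsIn_iff, pvW]
  norm_num
  constructor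
  · rintro ⟨⟨h0, h1, h2, h3, h4, h5⟩, c0, c1, c2, c3, c4, c5⟩
    refine ⟨by omega, by omega, ?_, ?_, ?_, ?_, ?_, ?_⟩ <;>
      (rw [← pvCell_natCast]; push_cast; assumption)
  · rintro ⟨hy, hx, c0, c1, c2, c3, c4, c5⟩
    refine ⟨⟨?_, ?_, ?_, ?_, ?_, ?_⟩, ?_, ?_, ?_, ?_, ?_, ?_⟩
    all_goals first
    | omega
    | (rw [← pvCell_natCast] at *; push_cast at *; assumption)

set_option maxHeartbeats 1600000 in
lemma hitA (B : List (List Int)) (p : Int) (y x : Nat) :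
  ((match pvSeg B (y : Int) (x : Int) 1 (-1) with
    | none => false
    | some seg => !seg.isEmpty && seg == [0,p,p,p,p,0]) = true) ↔
  (y + 6 ≤ B.length ∧ 5 ≤ x ∧ x < B.length ∧
    pvW p (pvV B y x) (pvV B (y+1) (x-1)) (pvV B (y+2) (x-2)) (pvV B (y+3) (x-3)) (pvV B (y+4) (x-4)) (pvV B (y+5) (x-5))) := by
  rw [pvSeg_hit]
  simp only [pvIsIn_iff, pvW]
  norm_num
  constructor
  · rintro ⟨⟨h0, h1, h2, h3, h4, h5⟩, c0, c1, c2, c3, c4, c5⟩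
    have hx5 : 5 ≤ x := by omega
    refine ⟨by omega, hx5, by omega, ?_, ?_, ?_, ?_, ?_, ?_⟩ <;>
      (rw [← pvCell_natCast]; push_cast [Nat.cast_sub (by omega : 1 ≤ x), Nat.cast_sub (by omega : 2 ≤ x),
        Nat.cast_sub (by omega : 3 ≤ x), Nat.cast_sub (by omega : 4 ≤ x), Nat.cast_sub (by omega : 5 ≤ x)]; assumption)
  · rintro ⟨hy, hx5, hx, c0, c1, c2, c3, c4, c5⟩
    refine ⟨⟨?_, ?_, ?_, ?_, ?_, ?_⟩, ?_, ?_, ?_, ?_, ?_, ?_⟩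
    all_goals first
    | omega
    | (rw [← pvCell_natCast] at *; push_cast [Nat.cast_sub (by omega : 1 ≤ x), Nat.cast_sub (by omega : 2 ≤ x),
        Nat.cast_sub (by omega : 3 ≤ x), Nat.cast_sub (by omega : 4 ≤ x), Nat.cast_sub (by omega : 5 ≤ x)] at *; assumption)

lemma A_iff (board : List (List Int)) (p : Int) :
    is_open_four board p = true ↔ pvHit board p := by
  unfold is_open_four
  simp only [List.any_eq_true, List.mem_range, List.any_cons, List.any_nil,
    Bool.or_eq_true, Bool.false_eq_true, or_false]
  simp only [hitH, hitV, hitD, hitA]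
  unfold pvHit
  constructor
  · rintro ⟨y, hy, x, hx, (h | h | h | h)⟩
    · exact Or.inl ⟨y, x, h⟩
    · exact Or.inr (Or.inl ⟨y, x, h⟩)
    · exact Or.inr (Or.inr (Or.inl ⟨y, x, h⟩))
    · exact Or.inr (Or.inr (Or.inr ⟨y, x, h⟩))
  · rintro (⟨y, x, h⟩ | ⟨y, x, h⟩ | ⟨y, x, h⟩ | ⟨y, x, h⟩)
    · exact ⟨y, h.1, x, by omega, Or.inl h⟩
    · exact ⟨y, by omega, x, h.2.1, Or.inr (Or.inl h)⟩
    · exact ⟨y, by omega, x, by omega, Or.inr (Or.inr (Or.inl h))⟩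
    · exact ⟨y, by omega, x, h.2.2.1, Or.inr (Or.inr (Or.inr h))⟩

lemma slice6 (m j : Nat) (f : Nat → Int) (h : j + 6 ≤ m) :
  PySem.List.slice ((List.range m).map f) (some (j:Int)) (some ((j:Int)+6)) = [f j, f (j+1), f (j+2), f (j+3), f (j+4), f (j+5)] := by
  have h1 : ((j:Int)+6) = (((j+6 : Nat)) : Int) := by push_cast; ring
  rw [h1, PySem.List.slice_natCast]
  rw [← List.map_drop, ← List.map_take]
  rw [List.range_eq_range', List.drop_range']
  have h2 : j + 6 - j = 6 := by omega
  rw [h2, List.take_range'_of_length_ge (by omega)]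
  have h0 : 0 + j * 1 = j := by omega
  rw [h0]
  have h3 : List.range' j 6 = [j, j+1, j+2, j+3, j+4, j+5] := by rfl
  rw [h3]; rfl

lemma window_any (m : Nat) (f : Nat → Int) (w0 w1 w2 w3 w4 w5 : Int) :
  (((PySem.List.pyRange 0 (PySem.List.len ((List.range m).map f) - 5) 1).any fun i =>
      PySem.List.slice ((List.range m).map f) (some i) (some (i + 6)) == [w0,w1,w2,w3,w4,w5]) = true)
  ↔ ∃ j : Nat, j + 6 ≤ m ∧ (f j = w0 ∧ f (j+1) = w1 ∧ f (j+2) = w2 ∧ f (j+3) = w3 ∧ f (j+4) = w4 ∧ f (j+5) = w5) := by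
  simp only [List.any_eq_true, PySem.List.mem_pyRange_one, PySem.List.len_eq, List.length_map,
    List.length_range, beq_iff_eq]
  constructor
  · rintro ⟨i, ⟨h0, h1⟩, hs⟩
    obtain ⟨j, rfl⟩ := Int.eq_ofNat_of_zero_le h0
    have hj : j + 6 ≤ m := by omega
    rw [slice6 m j f hj] at hs
    simp only [List.cons.injEq, and_true] at hs
    exact ⟨j, hj, by tauto⟩
  · rintro ⟨j, hj, c0, c1, c2, c3, c4, c5⟩
    refine ⟨(j:Int), ⟨by omega, by omega⟩, ?_⟩
    rw [slice6 m j f hj]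
    simp [c0, c1, c2, c3, c4, c5]

def pvG (B : List (List Int)) : List (List Int) :=
  (List.range B.length).map (fun y => (List.range B.length).map (fun x => pvV B y x))

lemma grid_eq (B : List (List Int)) (hpre : ∀ row ∈ B, B.length ≤ row.length) :
  (PySem.List.slice B none (some ((B.length : Int)))).map
    (fun row => PySem.List.slice row none (some ((B.length : Int)))) = pvG B := by
  rw [PySem.List.slice_to_natCast, List.take_length]
  apply List.ext_getElem
  · simp [pvG]
  · intro y hy hy2
    have hy' : y < B.length := by simpa using hy
    simp only [List.getElem_map, pvG, List.getElem_range, PySem.List.slice_to_natCast]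
    have hrow : B.length ≤ B[y].length := hpre B[y] (List.getElem_mem hy')
    apply List.ext_getElem
    · simpa using hrow
    · intro x hx hx2
      have hx' : x < B.length := by simpa using hx2
      simp only [List.getElem_take, List.getElem_map, List.getElem_range, pvV]
      rw [List.getD_eq_getElem B [] hy', List.getD_eq_getElem _ _ (by omega)]

lemma cell_pvG (B : List (List Int)) (y x : Nat) (hy : y < B.length) (hx : x < B.length) :
  pvCell (pvG B) (y : Int) (x : Int) = pvV B y x := by
  simp only [pvCell, PySem.List.pyGetD_natCast]
  have h1 : (pvG B).getD y [] = (List.range B.length).map (fun x => pvV B y x) := by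
    rw [List.getD_eq_getElem _ _ (by simp [pvG]; omega)]
    simp [pvG]
  rw [h1, List.getD_eq_getElem _ _ (by simpa using hx)]
  simp

lemma window_any' (m : Nat) (f : Nat → Int) (p : Int) :
  (∃ i ∈ PySem.List.pyRange 0 ((((List.range m).map f).length : Int) - 5),
      (PySem.List.slice ((List.range m).map f) (some i) (some (i + 6)) == [0,p,p,p,p,0]) = true)
  ↔ ∃ j : Nat, j + 6 ≤ m ∧ pvW p (f j) (f (j+1)) (f (j+2)) (f (j+3)) (f (j+4)) (f (j+5)) := by
  have h := window_any m f 0 p p p p 0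
  simp only [PySem.List.len_eq, List.any_eq_true] at h
  simpa [pvW] using h

lemma fam_rows (B : List (List Int)) (p : Int) :
  (((pvG B).any fun line =>
      (PySem.List.pyRange 0 ((line.length : Int) - 5)).any fun i =>
        PySem.List.slice line (some i) (some (i + 6)) == [0,p,p,p,p,0]) = true)
  ↔ ∃ y j : Nat, y < B.length ∧ j + 6 ≤ B.length ∧
      pvW p (pvV B y j) (pvV B y (j+1)) (pvV B y (j+2)) (pvV B y (j+3)) (pvV B y (j+4)) (pvV B y (j+5)) := by
  unfold pvG
  rw [List.any_map]
  simp only [List.any_eq_true, List.mem_range, Function.comp]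
  constructor
  · rintro ⟨y, hy, hw⟩
    rw [window_any'] at hw
    obtain ⟨j, hj, hc⟩ := hw
    exact ⟨y, j, hy, hj, hc⟩
  · rintro ⟨y, j, hy, hj, hc⟩
    exact ⟨y, hy, (window_any' _ _ _).2 ⟨j, hj, hc⟩⟩

lemma fam_cols (B : List (List Int)) (p : Int) :
  (((List.map (fun x => List.map (fun k => pvCell (pvG B) k x) (PySem.List.pyRange 0 (B.length : Int)))
        (PySem.List.pyRange 0 (B.length : Int))).any fun line =>
      (PySem.List.pyRange 0 ((line.length : Int) - 5)).any fun i =>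
        PySem.List.slice line (some i) (some (i + 6)) == [0,p,p,p,p,0]) = true)
  ↔ ∃ x j : Nat, x < B.length ∧ j + 6 ≤ B.length ∧
      pvW p (pvV B j x) (pvV B (j+1) x) (pvV B (j+2) x) (pvV B (j+3) x) (pvV B (j+4) x) (pvV B (j+5) x) := by
  rw [PySem.List.pyRange_zero_natCast]
  simp only [List.map_map]
  rw [List.any_map]
  simp only [Function.comp, List.any_eq_true, List.mem_range]
  constructor
  · rintro ⟨x, hx, hw⟩
    rw [window_any'] at hw
    obtain ⟨j, hj, hc⟩ := hw
    simp only [Function.comp_apply] at hc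
    refine ⟨x, j, hx, hj, ?_⟩
    rwa [cell_pvG B j x (by omega) hx, cell_pvG B (j+1) x (by omega) hx,
      cell_pvG B (j+2) x (by omega) hx, cell_pvG B (j+3) x (by omega) hx,
      cell_pvG B (j+4) x (by omega) hx, cell_pvG B (j+5) x (by omega) hx] at hc
  · rintro ⟨x, j, hx, hj, hc⟩
    refine ⟨x, hx, (window_any' _ _ _).2 ⟨j, hj, ?_⟩⟩
    simp only [Function.comp_apply]
    rwa [cell_pvG B j x (by omega) hx, cell_pvG B (j+1) x (by omega) hx,
      cell_pvG B (j+2) x (by omega) hx, cell_pvG B (j+3) x (by omega) hx,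
      cell_pvG B (j+4) x (by omega) hx, cell_pvG B (j+5) x (by omega) hx]

lemma fam_diagT (B : List (List Int)) (p : Int) :
  (((List.map (fun x => List.map (fun k => pvCell (pvG B) k (x + k))
        (PySem.List.pyRange 0 ((B.length : Int) - x)))
        (PySem.List.pyRange 0 (B.length : Int))).any fun line =>
      (PySem.List.pyRange 0 ((line.length : Int) - 5)).any fun i =>
        PySem.List.slice line (some i) (some (i + 6)) == [0,p,p,p,p,0]) = true)
  ↔ ∃ x j : Nat, x < B.length ∧ j + 6 ≤ B.length - x ∧
      pvW p (pvV B j (x+j)) (pvV B (j+1) (x+(j+1))) (pvV B (j+2) (x+(j+2)))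
        (pvV B (j+3) (x+(j+3))) (pvV B (j+4) (x+(j+4))) (pvV B (j+5) (x+(j+5))) := by
  rw [PySem.List.pyRange_zero_natCast]
  simp only [List.map_map]
  rw [List.any_map]
  simp only [Function.comp, List.any_eq_true, List.mem_range]
  constructor
  · rintro ⟨x, hx, hw⟩
    rw [show ((B.length:Int) - ↑x) = ((B.length - x : Nat) : Int) from by omega,
      PySem.List.pyRange_zero_natCast, List.map_map] at hw
    obtain ⟨j, hj, hc⟩ := (window_any' _ _ _).1 hw
    simp only [Function.comp_apply] at hc
    refine ⟨x, j, hx, hj, ?_⟩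
    rw [show ((x:Int) + ↑j) = ((x+j : Nat) : Int) from by omega,
      show ((x:Int) + ↑(j+1)) = ((x+(j+1) : Nat) : Int) from by omega,
      show ((x:Int) + ↑(j+2)) = ((x+(j+2) : Nat) : Int) from by omega,
      show ((x:Int) + ↑(j+3)) = ((x+(j+3) : Nat) : Int) from by omega,
      show ((x:Int) + ↑(j+4)) = ((x+(j+4) : Nat) : Int) from by omega,
      show ((x:Int) + ↑(j+5)) = ((x+(j+5) : Nat) : Int) from by omega] at hc
    rwa [cell_pvG B j (x+j) (by omega) (by omega),
      cell_pvG B (j+1) (x+(j+1)) (by omega) (by omega),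
      cell_pvG B (j+2) (x+(j+2)) (by omega) (by omega),
      cell_pvG B (j+3) (x+(j+3)) (by omega) (by omega),
      cell_pvG B (j+4) (x+(j+4)) (by omega) (by omega),
      cell_pvG B (j+5) (x+(j+5)) (by omega) (by omega)] at hc
  · rintro ⟨x, j, hx, hj, hc⟩
    refine ⟨x, hx, ?_⟩
    rw [show ((B.length:Int) - ↑x) = ((B.length - x : Nat) : Int) from by omega,
      PySem.List.pyRange_zero_natCast, List.map_map]
    refine (window_any' _ _ _).2 ⟨j, hj, ?_⟩
    simp only [Function.comp_apply]
    rw [show ((x:Int) + ↑j) = ((x+j : Nat) : Int) from by omega,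
      show ((x:Int) + ↑(j+1)) = ((x+(j+1) : Nat) : Int) from by omega,
      show ((x:Int) + ↑(j+2)) = ((x+(j+2) : Nat) : Int) from by omega,
      show ((x:Int) + ↑(j+3)) = ((x+(j+3) : Nat) : Int) from by omega,
      show ((x:Int) + ↑(j+4)) = ((x+(j+4) : Nat) : Int) from by omega,
      show ((x:Int) + ↑(j+5)) = ((x+(j+5) : Nat) : Int) from by omega]
    rwa [cell_pvG B j (x+j) (by omega) (by omega),
      cell_pvG B (j+1) (x+(j+1)) (by omega) (by omega),
      cell_pvG B (j+2) (x+(j+2)) (by omega) (by omega),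
      cell_pvG B (j+3) (x+(j+3)) (by omega) (by omega),
      cell_pvG B (j+4) (x+(j+4)) (by omega) (by omega),
      cell_pvG B (j+5) (x+(j+5)) (by omega) (by omega)]

lemma fam_diagL (B : List (List Int)) (p : Int) :
  (((List.map (fun y => List.map (fun k => pvCell (pvG B) (y + k) k)
        (PySem.List.pyRange 0 ((B.length : Int) - y)))
        (PySem.List.pyRange 1 (B.length : Int))).any fun line =>
      (PySem.List.pyRange 0 ((line.length : Int) - 5)).any fun i =>
        PySem.List.slice line (some i) (some (i + 6)) == [0,p,p,p,p,0]) = true)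
  ↔ ∃ y j : Nat, 1 ≤ y ∧ y < B.length ∧ j + 6 ≤ B.length - y ∧
      pvW p (pvV B (y+j) j) (pvV B (y+(j+1)) (j+1)) (pvV B (y+(j+2)) (j+2))
        (pvV B (y+(j+3)) (j+3)) (pvV B (y+(j+4)) (j+4)) (pvV B (y+(j+5)) (j+5)) := by
  rw [PySem.List.pyRange_one]
  rw [show (((B.length : Int)) - 1).toNat = B.length - 1 from by omega]
  simp only [List.map_map]
  rw [List.any_map]
  simp only [Function.comp, List.any_eq_true, List.mem_range]
  constructor
  · rintro ⟨w, hwlt, hw⟩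
    rw [show ((B.length:Int) - (1 + ↑w)) = ((B.length - (1+w) : Nat) : Int) from by omega,
      PySem.List.pyRange_zero_natCast, List.map_map] at hw
    obtain ⟨j, hj, hc⟩ := (window_any' _ _ _).1 hw
    simp only [Function.comp_apply] at hc
    refine ⟨1+w, j, by omega, by omega, hj, ?_⟩
    rw [show ((1:Int) + ↑w + ↑j) = (((1+w)+j : Nat) : Int) from by omega,
      show ((1:Int) + ↑w + ↑(j+1)) = (((1+w)+(j+1) : Nat) : Int) from by omega,
      show ((1:Int) + ↑w + ↑(j+2)) = (((1+w)+(j+2) : Nat) : Int) from by omega,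
      show ((1:Int) + ↑w + ↑(j+3)) = (((1+w)+(j+3) : Nat) : Int) from by omega,
      show ((1:Int) + ↑w + ↑(j+4)) = (((1+w)+(j+4) : Nat) : Int) from by omega,
      show ((1:Int) + ↑w + ↑(j+5)) = (((1+w)+(j+5) : Nat) : Int) from by omega] at hc
    rwa [cell_pvG B ((1+w)+j) j (by omega) (by omega),
      cell_pvG B ((1+w)+(j+1)) (j+1) (by omega) (by omega),
      cell_pvG B ((1+w)+(j+2)) (j+2) (by omega) (by omega),
      cell_pvG B ((1+w)+(j+3)) (j+3) (by omega) (by omega),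
      cell_pvG B ((1+w)+(j+4)) (j+4) (by omega) (by omega),
      cell_pvG B ((1+w)+(j+5)) (j+5) (by omega) (by omega)] at hc
  · rintro ⟨y, j, hy1, hy, hj, hc⟩
    refine ⟨y - 1, by omega, ?_⟩
    rw [show ((1:Int) + ↑(y-1)) = ((y : Nat) : Int) from by omega]
    rw [show ((B.length:Int) - ↑y) = ((B.length - y : Nat) : Int) from by omega,
      PySem.List.pyRange_zero_natCast, List.map_map]
    refine (window_any' _ _ _).2 ⟨j, hj, ?_⟩
    simp only [Function.comp_apply]
    rw [show ((y:Int) + ↑j) = ((y+j : Nat) : Int) from by omega,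
      show ((y:Int) + ↑(j+1)) = ((y+(j+1) : Nat) : Int) from by omega,
      show ((y:Int) + ↑(j+2)) = ((y+(j+2) : Nat) : Int) from by omega,
      show ((y:Int) + ↑(j+3)) = ((y+(j+3) : Nat) : Int) from by omega,
      show ((y:Int) + ↑(j+4)) = ((y+(j+4) : Nat) : Int) from by omega,
      show ((y:Int) + ↑(j+5)) = ((y+(j+5) : Nat) : Int) from by omega]
    rwa [cell_pvG B (y+j) j (by omega) (by omega),
      cell_pvG B (y+(j+1)) (j+1) (by omega) (by omega),
      cell_pvG B (y+(j+2)) (j+2) (by omega) (by omega),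
      cell_pvG B (y+(j+3)) (j+3) (by omega) (by omega),
      cell_pvG B (y+(j+4)) (j+4) (by omega) (by omega),
      cell_pvG B (y+(j+5)) (j+5) (by omega) (by omega)]

lemma fam_antiT (B : List (List Int)) (p : Int) :
  (((List.map (fun x => List.map (fun k => pvCell (pvG B) k (x - k))
        (PySem.List.pyRange 0 (x + 1)))
        (PySem.List.pyRange 0 (B.length : Int))).any fun line =>
      (PySem.List.pyRange 0 ((line.length : Int) - 5)).any fun i =>
        PySem.List.slice line (some i) (some (i + 6)) == [0,p,p,p,p,0]) = true)
  ↔ ∃ x j : Nat, x < B.length ∧ j + 6 ≤ x + 1 ∧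
      pvW p (pvV B j (x-j)) (pvV B (j+1) (x-(j+1))) (pvV B (j+2) (x-(j+2)))
        (pvV B (j+3) (x-(j+3))) (pvV B (j+4) (x-(j+4))) (pvV B (j+5) (x-(j+5))) := by
  rw [PySem.List.pyRange_zero_natCast]
  simp only [List.map_map]
  rw [List.any_map]
  simp only [Function.comp, List.any_eq_true, List.mem_range]
  constructor
  · rintro ⟨x, hx, hw⟩
    rw [show ((x:Int) + 1) = ((x + 1 : Nat) : Int) from by omega,
      PySem.List.pyRange_zero_natCast, List.map_map] at hw
    obtain ⟨j, hj, hc⟩ := (window_any' _ _ _).1 hw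
    simp only [Function.comp_apply] at hc
    refine ⟨x, j, hx, hj, ?_⟩
    rw [show ((x:Int) - ↑j) = ((x-j : Nat) : Int) from by omega,
      show ((x:Int) - ↑(j+1)) = ((x-(j+1) : Nat) : Int) from by omega,
      show ((x:Int) - ↑(j+2)) = ((x-(j+2) : Nat) : Int) from by omega,
      show ((x:Int) - ↑(j+3)) = ((x-(j+3) : Nat) : Int) from by omega,
      show ((x:Int) - ↑(j+4)) = ((x-(j+4) : Nat) : Int) from by omega,
      show ((x:Int) - ↑(j+5)) = ((x-(j+5) : Nat) : Int) from by omega] at hc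
    rwa [cell_pvG B j (x-j) (by omega) (by omega),
      cell_pvG B (j+1) (x-(j+1)) (by omega) (by omega),
      cell_pvG B (j+2) (x-(j+2)) (by omega) (by omega),
      cell_pvG B (j+3) (x-(j+3)) (by omega) (by omega),
      cell_pvG B (j+4) (x-(j+4)) (by omega) (by omega),
      cell_pvG B (j+5) (x-(j+5)) (by omega) (by omega)] at hc
  · rintro ⟨x, j, hx, hj, hc⟩
    refine ⟨x, hx, ?_⟩
    rw [show ((x:Int) + 1) = ((x + 1 : Nat) : Int) from by omega,
      PySem.List.pyRange_zero_natCast, List.map_map]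
    refine (window_any' _ _ _).2 ⟨j, hj, ?_⟩
    simp only [Function.comp_apply]
    rw [show ((x:Int) - ↑j) = ((x-j : Nat) : Int) from by omega,
      show ((x:Int) - ↑(j+1)) = ((x-(j+1) : Nat) : Int) from by omega,
      show ((x:Int) - ↑(j+2)) = ((x-(j+2) : Nat) : Int) from by omega,
      show ((x:Int) - ↑(j+3)) = ((x-(j+3) : Nat) : Int) from by omega,
      show ((x:Int) - ↑(j+4)) = ((x-(j+4) : Nat) : Int) from by omega,
      show ((x:Int) - ↑(j+5)) = ((x-(j+5) : Nat) : Int) from by omega]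
    rwa [cell_pvG B j (x-j) (by omega) (by omega),
      cell_pvG B (j+1) (x-(j+1)) (by omega) (by omega),
      cell_pvG B (j+2) (x-(j+2)) (by omega) (by omega),
      cell_pvG B (j+3) (x-(j+3)) (by omega) (by omega),
      cell_pvG B (j+4) (x-(j+4)) (by omega) (by omega),
      cell_pvG B (j+5) (x-(j+5)) (by omega) (by omega)]

lemma fam_antiR (B : List (List Int)) (p : Int) :
  (((List.map (fun y => List.map (fun k => pvCell (pvG B) (y + k) ((B.length : Int) - 1 - k))
        (PySem.List.pyRange 0 ((B.length : Int) - y)))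
        (PySem.List.pyRange 1 (B.length : Int))).any fun line =>
      (PySem.List.pyRange 0 ((line.length : Int) - 5)).any fun i =>
        PySem.List.slice line (some i) (some (i + 6)) == [0,p,p,p,p,0]) = true)
  ↔ ∃ y j : Nat, 1 ≤ y ∧ y < B.length ∧ j + 6 ≤ B.length - y ∧
      pvW p (pvV B (y+j) (B.length-1-j)) (pvV B (y+(j+1)) (B.length-1-(j+1)))
        (pvV B (y+(j+2)) (B.length-1-(j+2))) (pvV B (y+(j+3)) (B.length-1-(j+3)))
        (pvV B (y+(j+4)) (B.length-1-(j+4))) (pvV B (y+(j+5)) (B.length-1-(j+5))) := by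
  rw [PySem.List.pyRange_one]
  rw [show (((B.length : Int)) - 1).toNat = B.length - 1 from by omega]
  simp only [List.map_map]
  rw [List.any_map]
  simp only [Function.comp, List.any_eq_true, List.mem_range]
  constructor
  · rintro ⟨w, hwlt, hw⟩
    rw [show ((B.length:Int) - (1 + ↑w)) = ((B.length - (1+w) : Nat) : Int) from by omega,
      PySem.List.pyRange_zero_natCast, List.map_map] at hw
    obtain ⟨j, hj, hc⟩ := (window_any' _ _ _).1 hw
    simp only [Function.comp_apply] at hc
    refine ⟨1+w, j, by omega, by omega, hj, ?_⟩
    rw [show ((1:Int) + ↑w + ↑j) = (((1+w)+j : Nat) : Int) from by omega,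
      show ((1:Int) + ↑w + ↑(j+1)) = (((1+w)+(j+1) : Nat) : Int) from by omega,
      show ((1:Int) + ↑w + ↑(j+2)) = (((1+w)+(j+2) : Nat) : Int) from by omega,
      show ((1:Int) + ↑w + ↑(j+3)) = (((1+w)+(j+3) : Nat) : Int) from by omega,
      show ((1:Int) + ↑w + ↑(j+4)) = (((1+w)+(j+4) : Nat) : Int) from by omega,
      show ((1:Int) + ↑w + ↑(j+5)) = (((1+w)+(j+5) : Nat) : Int) from by omega,
      show ((B.length:Int) - 1 - ↑j) = ((B.length-1-j : Nat) : Int) from by omega,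
      show ((B.length:Int) - 1 - ↑(j+1)) = ((B.length-1-(j+1) : Nat) : Int) from by omega,
      show ((B.length:Int) - 1 - ↑(j+2)) = ((B.length-1-(j+2) : Nat) : Int) from by omega,
      show ((B.length:Int) - 1 - ↑(j+3)) = ((B.length-1-(j+3) : Nat) : Int) from by omega,
      show ((B.length:Int) - 1 - ↑(j+4)) = ((B.length-1-(j+4) : Nat) : Int) from by omega,
      show ((B.length:Int) - 1 - ↑(j+5)) = ((B.length-1-(j+5) : Nat) : Int) from by omega] at hc
    rwa [cell_pvG B ((1+w)+j) (B.length-1-j) (by omega) (by omega),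
      cell_pvG B ((1+w)+(j+1)) (B.length-1-(j+1)) (by omega) (by omega),
      cell_pvG B ((1+w)+(j+2)) (B.length-1-(j+2)) (by omega) (by omega),
      cell_pvG B ((1+w)+(j+3)) (B.length-1-(j+3)) (by omega) (by omega),
      cell_pvG B ((1+w)+(j+4)) (B.length-1-(j+4)) (by omega) (by omega),
      cell_pvG B ((1+w)+(j+5)) (B.length-1-(j+5)) (by omega) (by omega)] at hc
  · rintro ⟨y, j, hy1, hy, hj, hc⟩
    refine ⟨y - 1, by omega, ?_⟩
    rw [show ((1:Int) + ↑(y-1)) = ((y : Nat) : Int) from by omega]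
    rw [show ((B.length:Int) - ↑y) = ((B.length - y : Nat) : Int) from by omega,
      PySem.List.pyRange_zero_natCast, List.map_map]
    refine (window_any' _ _ _).2 ⟨j, hj, ?_⟩
    simp only [Function.comp_apply]
    rw [show ((y:Int) + ↑j) = ((y+j : Nat) : Int) from by omega,
      show ((y:Int) + ↑(j+1)) = ((y+(j+1) : Nat) : Int) from by omega,
      show ((y:Int) + ↑(j+2)) = ((y+(j+2) : Nat) : Int) from by omega,
      show ((y:Int) + ↑(j+3)) = ((y+(j+3) : Nat) : Int) from by omega,
      show ((y:Int) + ↑(j+4)) = ((y+(j+4) : Nat) : Int) from by omega,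
      show ((y:Int) + ↑(j+5)) = ((y+(j+5) : Nat) : Int) from by omega,
      show ((B.length:Int) - 1 - ↑j) = ((B.length-1-j : Nat) : Int) from by omega,
      show ((B.length:Int) - 1 - ↑(j+1)) = ((B.length-1-(j+1) : Nat) : Int) from by omega,
      show ((B.length:Int) - 1 - ↑(j+2)) = ((B.length-1-(j+2) : Nat) : Int) from by omega,
      show ((B.length:Int) - 1 - ↑(j+3)) = ((B.length-1-(j+3) : Nat) : Int) from by omega,
      show ((B.length:Int) - 1 - ↑(j+4)) = ((B.length-1-(j+4) : Nat) : Int) from by omega,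
      show ((B.length:Int) - 1 - ↑(j+5)) = ((B.length-1-(j+5) : Nat) : Int) from by omega]
    rwa [cell_pvG B (y+j) (B.length-1-j) (by omega) (by omega),
      cell_pvG B (y+(j+1)) (B.length-1-(j+1)) (by omega) (by omega),
      cell_pvG B (y+(j+2)) (B.length-1-(j+2)) (by omega) (by omega),
      cell_pvG B (y+(j+3)) (B.length-1-(j+3)) (by omega) (by omega),
      cell_pvG B (y+(j+4)) (B.length-1-(j+4)) (by omega) (by omega),
      cell_pvG B (y+(j+5)) (B.length-1-(j+5)) (by omega) (by omega)]

def pvBHit (B : List (List Int)) (p : Int) : Prop :=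
  (∃ y j : Nat, y < B.length ∧ j + 6 ≤ B.length ∧
      pvW p (pvV B y j) (pvV B y (j+1)) (pvV B y (j+2)) (pvV B y (j+3)) (pvV B y (j+4)) (pvV B y (j+5))) ∨
  (∃ x j : Nat, x < B.length ∧ j + 6 ≤ B.length ∧
      pvW p (pvV B j x) (pvV B (j+1) x) (pvV B (j+2) x) (pvV B (j+3) x) (pvV B (j+4) x) (pvV B (j+5) x)) ∨
  (∃ x j : Nat, x < B.length ∧ j + 6 ≤ B.length - x ∧
      pvW p (pvV B j (x+j)) (pvV B (j+1) (x+(j+1))) (pvV B (j+2) (x+(j+2)))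
        (pvV B (j+3) (x+(j+3))) (pvV B (j+4) (x+(j+4))) (pvV B (j+5) (x+(j+5)))) ∨
  (∃ y j : Nat, 1 ≤ y ∧ y < B.length ∧ j + 6 ≤ B.length - y ∧
      pvW p (pvV B (y+j) j) (pvV B (y+(j+1)) (j+1)) (pvV B (y+(j+2)) (j+2))
        (pvV B (y+(j+3)) (j+3)) (pvV B (y+(j+4)) (j+4)) (pvV B (y+(j+5)) (j+5))) ∨
  (∃ x j : Nat, x < B.length ∧ j + 6 ≤ x + 1 ∧
      pvW p (pvV B j (x-j)) (pvV B (j+1) (x-(j+1))) (pvV B (j+2) (x-(j+2)))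
        (pvV B (j+3) (x-(j+3))) (pvV B (j+4) (x-(j+4))) (pvV B (j+5) (x-(j+5)))) ∨
  (∃ y j : Nat, 1 ≤ y ∧ y < B.length ∧ j + 6 ≤ B.length - y ∧
      pvW p (pvV B (y+j) (B.length-1-j)) (pvV B (y+(j+1)) (B.length-1-(j+1)))
        (pvV B (y+(j+2)) (B.length-1-(j+2))) (pvV B (y+(j+3)) (B.length-1-(j+3)))
        (pvV B (y+(j+4)) (B.length-1-(j+4))) (pvV B (y+(j+5)) (B.length-1-(j+5))))

lemma B_iff1 (B : List (List Int)) (p : Int) (hpre : ∀ row ∈ B, B.length ≤ row.length) :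
  is_open_four_alt B p = true ↔ pvBHit B p := by
  unfold is_open_four_alt
  simp only [PySem.List.len_eq]
  rw [grid_eq B hpre]
  simp only [List.any_append, Bool.or_eq_true]
  rw [fam_rows, fam_cols, fam_diagT, fam_diagL, fam_antiT, fam_antiR]
  unfold pvBHit
  simp only [or_assoc]


lemma BHit_iff (B : List (List Int)) (p : Int) : pvBHit B p ↔ pvHit B p := by
  unfold pvBHit pvHit
  constructor
  · rintro (⟨y, j, hy, hj, hc⟩ | ⟨x, j, hx, hj, hc⟩ | ⟨x, j, hx, hj, hc⟩ |
      ⟨y, j, hy1, hy, hj, hc⟩ | ⟨x, j, hx, hj, hc⟩ | ⟨y, j, hy1, hy, hj, hc⟩)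
    · exact Or.inl ⟨y, j, hy, hj, hc⟩
    · exact Or.inr (Or.inl ⟨j, x, hj, hx, hc⟩)
    · refine Or.inr (Or.inr (Or.inl ⟨j, x+j, by omega, by omega, ?_⟩))
      convert hc using 2 <;> omega
    · refine Or.inr (Or.inr (Or.inl ⟨y+j, j, by omega, by omega, ?_⟩))
      convert hc using 2 <;> omega
    · refine Or.inr (Or.inr (Or.inr ⟨j, x-j, by omega, by omega, by omega, ?_⟩))
      convert hc using 2 <;> omega
    · refine Or.inr (Or.inr (Or.inr ⟨y+j, B.length-1-j, by omega, by omega, by omega, ?_⟩))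
      convert hc using 2 <;> omega
  · rintro (⟨y, x, hy, hx, hc⟩ | ⟨y, x, hy, hx, hc⟩ | ⟨y, x, hy, hx, hc⟩ | ⟨y, x, hy, hx5, hx, hc⟩)
    · exact Or.inl ⟨y, x, hy, hx, hc⟩
    · exact Or.inr (Or.inl ⟨x, y, hx, hy, hc⟩)
    · by_cases hyx : y ≤ x
      · refine Or.inr (Or.inr (Or.inl ⟨x-y, y, by omega, by omega, ?_⟩))
        convert hc using 2 <;> omega
      · refine Or.inr (Or.inr (Or.inr (Or.inl ⟨y-x, x, by omega, by omega, by omega, ?_⟩)))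
        convert hc using 2 <;> omega
    · by_cases hs : x + y < B.length
      · refine Or.inr (Or.inr (Or.inr (Or.inr (Or.inl ⟨x+y, y, by omega, by omega, ?_⟩))))
        convert hc using 2 <;> omega
      · refine Or.inr (Or.inr (Or.inr (Or.inr (Or.inr ⟨x+y+1-B.length, B.length-1-x, by omega, by omega, by omega, ?_⟩))))
        convert hc using 2 <;> omega

lemma B_iff (board : List (List Int)) (p : Int) (hpre : Pre_is_open_four board p) :
    is_open_four_alt board p = true ↔ pvHit board p :=
  (B_iff1 board p hpre).trans (BHit_iff board p)

-- ===== VERDICT (by name: the statement is the Claim_ definition above) =====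
theorem is_open_four_spec : Claim_equal_is_open_four := by
  intro board player _ hpre
  unfold Spec_is_open_four
  have hA := A_iff board player
  have hB := B_iff board player hpre
  cases hA' : is_open_four board player <;> cases hB' : is_open_four_alt board player <;> simp_all
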